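-- pv_equiv track=rewrite | github.com/mbartnicki80/WDI | zestaw4/zad18zestaw4.py | funk
-- ===== SOURCE A (Python) =====
-- def funk(tab, n):
--
--     maxsuma = 0
--
--     for i in range(n):
--         for j in range(n):
--             a = j
--             sumele = 1
--             suma = 0
--
--             while a<n and sumele <= 10:
--                 suma += tab[i][a]
--                 a += 1
--                 sumele += 1
--                 maxsuma = max(suma, maxsuma)
--
--     for i in range(n):
--         for j in range(n):
--             a = j
--             sumele = 1
--             suma = 0
--
--             while a<n and sumele <= 10:
--                 suma += tab[a][i]
--                 a += 1
--                 sumele += 1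
--                 maxsuma = max(suma, maxsuma)
--
--     return maxsuma
-- ===== SOURCE B (Python) =====
-- def funk(tab, n):
--     # prefix-sum re-implementation: window sums read off a prefix table per line
--     lines = [[tab[i][a] for a in range(n)] for i in range(n)]
--     lines += [[tab[a][i] for a in range(n)] for i in range(n)]
--     best = 0
--     for line in lines:
--         pref = [0]
--         s = 0
--         for x in line:
--             s += x
--             pref.append(s)
--         for j in range(n):
--             for L in range(1, min(10, n - j) + 1):
--                 best = max(pref[j + L] - pref[j], best)
--     return best
-- ===== Notes on version B (the rewrite author's own statement) =====
-- stated objective: alternative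
-- what changed: Replaces the running-sum while-loops with a prefix-sum table built once per row/column, so every window sum is a difference of two prefix entries; rows and columns are materialised as one list of lines scanned uniformly.
import Mathlib
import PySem

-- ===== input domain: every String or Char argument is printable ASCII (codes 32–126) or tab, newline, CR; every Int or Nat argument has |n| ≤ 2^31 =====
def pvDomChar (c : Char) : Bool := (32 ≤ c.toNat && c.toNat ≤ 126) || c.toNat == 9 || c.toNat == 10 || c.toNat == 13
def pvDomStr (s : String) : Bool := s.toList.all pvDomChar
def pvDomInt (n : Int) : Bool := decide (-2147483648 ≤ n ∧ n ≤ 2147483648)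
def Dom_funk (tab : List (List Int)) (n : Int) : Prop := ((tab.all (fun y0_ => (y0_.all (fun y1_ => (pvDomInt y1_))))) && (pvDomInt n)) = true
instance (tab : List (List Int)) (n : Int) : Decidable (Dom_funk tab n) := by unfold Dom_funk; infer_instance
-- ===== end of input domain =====

-- B replaces A's running-sum while-loops by a prefix-sum table per line; same value, same cost (objective: alternative).

-- ===== PORT A =====
-- the inner 'while a<n and sumele <= 10' loop; 'get a' is tab[i][a] (rows) or tab[a][i] (columns)
def funkLoop (get : Int → Int) (n : Int) (a sumele suma maxsuma : Int) : Int :=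
  if _h : a < n ∧ sumele ≤ 10 then
    funkLoop get n (a + 1) (sumele + 1) (suma + get a) (max (suma + get a) maxsuma)
  else maxsuma
termination_by (11 - sumele).toNat
decreasing_by omega

def funk (tab : List (List Int)) (n : Int) : Int :=
  let m1 := (PySem.List.pyRange 0 n 1).foldl (fun acc i =>
    (PySem.List.pyRange 0 n 1).foldl (fun acc2 j =>
      funkLoop (fun a => PySem.List.pyGetD (PySem.List.pyGetD tab i []) a 0) n j 1 0 acc2) acc) 0
  (PySem.List.pyRange 0 n 1).foldl (fun acc i =>
    (PySem.List.pyRange 0 n 1).foldl (fun acc2 j =>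
      funkLoop (fun a => PySem.List.pyGetD (PySem.List.pyGetD tab a []) i 0) n j 1 0 acc2) acc) m1

-- ===== PORT B =====
-- pref = [0]; s = 0; for x in line: s += x; pref.append(s)
def prefixOf (line : List Int) : List Int :=
  (line.foldl (fun (st : List Int × Int) x => (st.1 ++ [st.2 + x], st.2 + x)) ([0], 0)).1

def funk_alt (tab : List (List Int)) (n : Int) : Int :=
  let lines :=
    (PySem.List.pyRange 0 n 1).map (fun i =>
      (PySem.List.pyRange 0 n 1).map (fun a => PySem.List.pyGetD (PySem.List.pyGetD tab i []) a 0))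
    ++ (PySem.List.pyRange 0 n 1).map (fun i =>
      (PySem.List.pyRange 0 n 1).map (fun a => PySem.List.pyGetD (PySem.List.pyGetD tab a []) i 0))
  lines.foldl (fun best line =>
    let pref := prefixOf line
    (PySem.List.pyRange 0 n 1).foldl (fun b j =>
      (PySem.List.pyRange 1 (min 10 (n - j) + 1) 1).foldl (fun b2 L =>
        max (PySem.List.pyGetD pref (j + L) 0 - PySem.List.pyGetD pref j 0) b2) b) best) 0

-- ===== PRECONDITION & SPEC =====
-- A indexes tab[i][a] / tab[a][i] for all 0 ≤ i, a < n: it raises IndexError unless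
-- the table has at least n rows each of length at least n.
def Pre_funk (tab : List (List Int)) (n : Int) : Prop :=
  n ≤ (tab.length : Int) ∧ ∀ row ∈ tab.take n.toNat, n ≤ (row.length : Int)
instance (tab : List (List Int)) (n : Int) : Decidable (Pre_funk tab n) := by
  unfold Pre_funk; infer_instance

def pvWitness_funk : List (List Int) × Int := ([[1, -2], [3, 4]], 2)

def Spec_funk (tab : List (List Int)) (n : Int) (out : Int) : Prop := out = funk_alt tab n
instance (tab : List (List Int)) (n : Int) (out : Int) : Decidable (Spec_funk tab n out) := by
  unfold Spec_funk; infer_instance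

-- ===== CLAIM (what is proved, stated in full; the proofs are below) =====
def Claim_equal_funk : Prop := ∀ (tab : List (List Int)) (n : Int), Dom_funk tab n → Pre_funk tab n → Spec_funk tab n (funk tab n)

-- ===== LEMMAS AND PROOFS =====

-- sum of the window of length m starting at index a
def winP (get : Int → Int) (a : Int) (m : Nat) : Int :=
  ((List.range m).map (fun (k : Nat) => get (a + (k : Int)))).sum

theorem winP_zero (get : Int → Int) (a : Int) : winP get a 0 = 0 := rfl

theorem winP_succ (get : Int → Int) (a : Int) (m : Nat) :
    winP get a (m + 1) = get a + winP get (a + 1) m := by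
  unfold winP
  rw [List.range_succ_eq_map]
  simp only [List.map_cons, List.map_map, List.sum_cons, Nat.cast_zero, add_zero]
  congr 1
  refine congrArg List.sum (List.map_congr_left ?_)
  intro k _
  simp only [Function.comp_apply]
  congr 1
  push_cast
  ring

theorem winP_one (get : Int → Int) (a : Int) : winP get a 1 = get a := by
  have := winP_succ get a 0
  simpa [winP_zero] using this

theorem winP_add (get : Int → Int) (a : Int) (u v : Nat) :
    winP get a (u + v) = winP get a u + winP get (a + u) v := by
  induction u generalizing a with
  | zero => simp [winP_zero]
  | succ u ih =>
      have h1 : u + 1 + v = (u + v) + 1 := by omega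
      rw [h1, winP_succ, ih, winP_succ]
      have h2 : a + ((u : Nat) + 1 : Nat) = (a + 1) + ((u : Nat) : Int) := by push_cast; ring
      rw [h2]
      ring

theorem funkLoop_eq (get : Int → Int) (n : Int) :
    ∀ (f : Nat) (a s suma acc : Int), (f : Int) = max 0 (min (n - a) (11 - s)) →
    funkLoop get n a s suma acc =
      (List.range f).foldl (fun b t => max (suma + winP get a (t + 1)) b) acc := by
  intro f
  induction f with
  | zero =>
      intro a s suma acc hf
      rw [funkLoop]
      rw [dif_neg (by omega)]
      simp
  | succ t ih =>
      intro a s suma acc hf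
      rw [funkLoop]
      rw [dif_pos (by constructor <;> omega)]
      rw [ih (a + 1) (s + 1) (suma + get a) (max (suma + get a) acc) (by push_cast at hf ⊢; omega)]
      rw [List.range_succ_eq_map, List.foldl_cons, List.foldl_map]
      have h0 : max (suma + winP get a (0 + 1)) acc = max (suma + get a) acc := by
        rw [Nat.zero_add, winP_one]
      rw [h0]
      apply PySem.List.foldl_congr_mem
      intro b k _
      simp only [winP_succ]
      congr 1
      ring

theorem prefixOf_aux (line : List Int) :
    ∀ (p : List Int) (s : Int),
      (line.foldl (fun (st : List Int × Int) x => (st.1 ++ [st.2 + x], st.2 + x)) (p, s)).1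
        = p ++ (List.range line.length).map (fun k => s + (line.take (k + 1)).sum) := by
  induction line with
  | nil => intro p s; simp
  | cons x xs ih =>
      intro p s
      simp only [List.foldl_cons]
      rw [ih (p ++ [s + x]) (s + x)]
      rw [List.length_cons, List.range_succ_eq_map, List.map_cons, List.map_map,
        List.append_assoc, List.singleton_append]
      congr 1
      congr 1
      · simp
      refine List.map_congr_left ?_
      intro k _
      simp only [Function.comp_apply, List.take_succ_cons, List.sum_cons]
      ring

theorem prefixOf_getD (line : List Int) (k : Nat) (hk : k ≤ line.length) :
    (prefixOf line).getD k 0 = (line.take k).sum := by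
  unfold prefixOf
  rw [prefixOf_aux line [0] 0]
  cases k with
  | zero => simp
  | succ k =>
      have hk' : k < line.length := by omega
      simp only [List.cons_append, List.nil_append, List.getD_cons_succ]
      rw [List.getD_eq_getElem _ _ (by simpa using hk')]
      simp [hk']

theorem pref_val (get : Int → Int) (n : Int) (t : Nat) (ht : (t : Int) ≤ n) :
    PySem.List.pyGetD (prefixOf ((PySem.List.pyRange 0 n 1).map get)) (t : Int) 0 = winP get 0 t := by
  rw [PySem.List.pyGetD_natCast]
  rw [prefixOf_getD _ _ (by simp [PySem.List.length_pyRange_one]; omega)]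
  rw [PySem.List.pyRange_one, List.map_map, ← List.map_take, List.take_range]
  rw [show min t (n - 0).toNat = t from by omega]
  unfold winP
  refine congrArg List.sum (List.map_congr_left ?_)
  intro k _
  simp [Function.comp]

theorem windows_eq (get : Int → Int) (n j acc : Int) (hj0 : 0 ≤ j) (hjn : j < n) :
    (PySem.List.pyRange 1 (min 10 (n - j) + 1) 1).foldl (fun b2 L =>
      max (PySem.List.pyGetD (prefixOf ((PySem.List.pyRange 0 n 1).map get)) (j + L) 0
         - PySem.List.pyGetD (prefixOf ((PySem.List.pyRange 0 n 1).map get)) j 0) b2) acc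
    = funkLoop get n j 1 0 acc := by
  rw [funkLoop_eq get n ((min 10 (n - j)).toNat) j 1 0 acc (by omega)]
  rw [PySem.List.pyRange_one 1 (min 10 (n - j) + 1)]
  rw [show (min 10 (n - j) + 1 - 1) = min 10 (n - j) from by ring]
  rw [List.foldl_map]
  apply PySem.List.foldl_congr_mem
  intro b k hk
  rw [List.mem_range] at hk
  have hk' : (k : Int) + 1 ≤ min 10 (n - j) := by omega
  rw [show j = ((j.toNat : Nat) : Int) from by omega]
  rw [show ((j.toNat : Nat) : Int) + (1 + (k : Int)) = ((j.toNat + (k + 1) : Nat) : Int) from by push_cast; ring]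
  rw [pref_val get n (j.toNat + (k + 1)) (by push_cast; omega)]
  rw [pref_val get n j.toNat (by omega)]
  rw [winP_add, zero_add]
  congr 1
  ring

theorem middle_eq (get : Int → Int) (n best : Int) :
    (PySem.List.pyRange 0 n 1).foldl (fun b j =>
      (PySem.List.pyRange 1 (min 10 (n - j) + 1) 1).foldl (fun b2 L =>
        max (PySem.List.pyGetD (prefixOf ((PySem.List.pyRange 0 n 1).map get)) (j + L) 0
           - PySem.List.pyGetD (prefixOf ((PySem.List.pyRange 0 n 1).map get)) j 0) b2) b) best
    = (PySem.List.pyRange 0 n 1).foldl (fun acc2 j => funkLoop get n j 1 0 acc2) best := by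
  apply PySem.List.foldl_congr_mem
  intro b j hj
  rw [PySem.List.mem_pyRange_one] at hj
  exact windows_eq get n j b hj.1 hj.2

theorem pass_eq (n : Int) (lineIdx : Int → Int → Int) (init : Int) :
    (((PySem.List.pyRange 0 n 1).map (fun i => (PySem.List.pyRange 0 n 1).map (fun a => lineIdx i a))).foldl
      (fun best line =>
        let pref := prefixOf line
        (PySem.List.pyRange 0 n 1).foldl (fun b j =>
          (PySem.List.pyRange 1 (min 10 (n - j) + 1) 1).foldl (fun b2 L =>
            max (PySem.List.pyGetD pref (j + L) 0 - PySem.List.pyGetD pref j 0) b2) b) best) init)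
    = (PySem.List.pyRange 0 n 1).foldl (fun acc i =>
        (PySem.List.pyRange 0 n 1).foldl (fun acc2 j => funkLoop (fun a => lineIdx i a) n j 1 0 acc2) acc) init := by
  rw [List.foldl_map]
  apply PySem.List.foldl_congr_mem
  intro best i _
  exact middle_eq (fun a => lineIdx i a) n best

theorem funk_spec_aux : ∀ (tab : List (List Int)) (n : Int), Pre_funk tab n → funk tab n = funk_alt tab n := by
  intro tab n _
  simp only [funk, funk_alt]
  rw [List.foldl_append]
  rw [pass_eq n (fun i a => PySem.List.pyGetD (PySem.List.pyGetD tab i []) a 0)]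
  rw [pass_eq n (fun i a => PySem.List.pyGetD (PySem.List.pyGetD tab a []) i 0)]

-- ===== VERDICT (by name: the statement is the Claim_ definition above) =====
theorem funk_spec : Claim_equal_funk := by
  intro tab n _ hpre
  unfold Spec_funk
  exact funk_spec_aux tab n hpre
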